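-- pv_equiv track=rewrite | github.com/udiNaveh/PITECA | Code/sharedutils/general_utils.py | inverse_dicts
-- ===== SOURCE A (Python) =====
-- def inverse_dicts(dict):
--
--     inversed = {}
--     keys = [k for k in dict.keys()]
--     for k in keys:
--         for inner_key in dict[k]:
--             if inner_key not in inversed:
--                 inversed[inner_key] = {}
--             inversed[inner_key][k] = dict[k][inner_key]
--     return inversed
-- ===== SOURCE B (Python) =====
-- def inverse_dicts(dict):
--     seen = set()
--     inner_keys = []
--     for d in dict.values():
--         for ik in d:
--             if ik not in seen:
--                 seen.add(ik)
--                 inner_keys.append(ik)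
--     return {ik: {k: dict[k][ik] for k in dict if ik in dict[k]} for ik in inner_keys}
-- ===== Notes on version B (the rewrite author's own statement) =====
-- stated objective: alternative
-- what changed: Inverts control: B first collects the distinct inner keys in order of first appearance, then builds each output row by one dict comprehension scanning the outer dict, instead of A's single pass that mutates nested dicts entry by entry.
import Mathlib
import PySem

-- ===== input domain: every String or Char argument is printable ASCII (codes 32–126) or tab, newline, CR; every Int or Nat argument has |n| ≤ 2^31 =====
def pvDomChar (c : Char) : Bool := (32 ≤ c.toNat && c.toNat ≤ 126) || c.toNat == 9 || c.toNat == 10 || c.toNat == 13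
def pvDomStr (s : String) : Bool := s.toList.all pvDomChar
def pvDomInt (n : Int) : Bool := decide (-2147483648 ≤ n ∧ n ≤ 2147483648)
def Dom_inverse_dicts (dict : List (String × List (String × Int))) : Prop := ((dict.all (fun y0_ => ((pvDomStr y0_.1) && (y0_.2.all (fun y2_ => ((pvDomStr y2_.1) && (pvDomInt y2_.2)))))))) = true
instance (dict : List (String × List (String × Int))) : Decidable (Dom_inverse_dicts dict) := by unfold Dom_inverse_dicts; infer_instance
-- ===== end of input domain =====

-- B inverts control: it collects the distinct inner keys first (in order of first appearance) and then
-- builds each output row by one scan over the outer dict, instead of A's single pass mutating nested dicts.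

-- ===== PORT A =====
def inverse_dicts (dict : List (String × List (String × Int))) : List (String × List (String × Int)) :=
  -- the Python argument is a dict of dicts; its nested PySem.Dict form:
  let d : PySem.Dict String (PySem.Dict String Int) :=
    PySem.Dict.mk (dict.map (fun p => (p.1, PySem.Dict.mk p.2)))
  -- inversed = {}; keys = [k for k in dict.keys()]
  let keys : List String := d.keys
  -- for k in keys: for inner_key in dict[k]: …
  let inversed : PySem.Dict String (PySem.Dict String Int) :=
    keys.foldl (fun inversed k =>
      (d.getD k PySem.Dict.empty).keys.foldl (fun inversed inner_key =>
        -- if inner_key not in inversed: inversed[inner_key] = {}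
        let inversed :=
          if inversed.contains inner_key then inversed
          else inversed.insert inner_key PySem.Dict.empty
        -- inversed[inner_key][k] = dict[k][inner_key]
        inversed.modify inner_key PySem.Dict.empty
          (fun inner => inner.insert k ((d.getD k PySem.Dict.empty).getD inner_key 0)))
        inversed) PySem.Dict.empty
  inversed.items.map (fun p => (p.1, p.2.items))

-- ===== PORT B =====
def inverse_dicts_alt (dict : List (String × List (String × Int))) : List (String × List (String × Int)) :=
  -- Source B's (seen, inner_keys) pair: a PySem.Set IS the distinct elements in first-insertion order
  let inner_keys : PySem.Set String :=
    dict.foldl (fun s p => p.2.foldl (fun s q => PySem.Set.add s q.1) s) PySem.Set.empty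
  -- {ik: {k: dict[k][ik] for k in dict if ik in dict[k]} for ik in inner_keys}
  inner_keys.map (fun ik =>
    (ik, dict.filterMap (fun p => ((PySem.Dict.mk p.2).get? ik).map (fun v => (p.1, v)))))

-- ===== PRECONDITION & SPEC =====
-- Pre_ excludes association lists with duplicate outer keys or duplicate keys inside an inner list:
-- such lists do not represent any Python dict (dict keys are unique), so A is never called on them.
def Pre_inverse_dicts (dict : List (String × List (String × Int))) : Prop :=
  (dict.map (·.1)).Nodup ∧ ∀ p ∈ dict, (p.2.map (·.1)).Nodup
instance (dict : List (String × List (String × Int))) : Decidable (Pre_inverse_dicts dict) := by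
  unfold Pre_inverse_dicts; infer_instance

def pvWitness_inverse_dicts : (List (String × List (String × Int))) :=
  [("a", [("x", 1), ("y", 2)]), ("b", [("x", 3)])]

def Spec_inverse_dicts (dict : List (String × List (String × Int))) (out : List (String × List (String × Int))) : Prop := out = inverse_dicts_alt dict
instance (dict : List (String × List (String × Int))) (out : List (String × List (String × Int))) : Decidable (Spec_inverse_dicts dict out) := by unfold Spec_inverse_dicts; infer_instance

-- ===== CLAIM (what is proved, stated in full; the proofs are below) =====
def Claim_equal_inverse_dicts : Prop := ∀ (dict : List (String × List (String × Int))), Dom_inverse_dicts dict → Pre_inverse_dicts dict → Spec_inverse_dicts dict (inverse_dicts dict)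

-- ===== LEMMAS AND PROOFS =====

-- one inner-loop step of A, with the two dict lookups already resolved to the pair's own entries
def gstep (k : String) (inv : PySem.Dict String (PySem.Dict String Int)) (q : String × Int) :
    PySem.Dict String (PySem.Dict String Int) :=
  (if inv.contains q.1 then inv else inv.insert q.1 PySem.Dict.empty).modify q.1 PySem.Dict.empty
    (fun inner => inner.insert k q.2)

-- A's whole double loop in that resolved form
def afold (dict : List (String × List (String × Int))) : PySem.Dict String (PySem.Dict String Int) :=
  dict.foldl (fun inv p => p.2.foldl (gstep p.1) inv) PySem.Dict.empty

-- B's row for inner key ik, and B's ordered set of inner keys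
def collect (dict : List (String × List (String × Int))) (ik : String) : List (String × Int) :=
  dict.filterMap (fun p => ((PySem.Dict.mk p.2).get? ik).map (fun v => (p.1, v)))

def ikeys (dict : List (String × List (String × Int))) : PySem.Set String :=
  dict.foldl (fun s p => p.2.foldl (fun s q => PySem.Set.add s q.1) s) PySem.Set.empty

-- under Pre_, A's loop body IS gstep (both dict lookups hit the pair's own entry)
theorem stage1 (dict : List (String × List (String × Int))) (h : Pre_inverse_dicts dict) :
    inverse_dicts dict = (afold dict).items.map (fun p => (p.1, p.2.items)) := by
  obtain ⟨h1, h2⟩ := h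
  have hbig : ∀ p ∈ dict,
      (PySem.Dict.mk (dict.map (fun p => (p.1, PySem.Dict.mk p.2)))).getD p.1 PySem.Dict.empty
        = PySem.Dict.mk p.2 := by
    intro p hp
    exact PySem.Dict.getD_of_mem_items _
      (List.mem_map_of_mem (f := fun p => (p.1, PySem.Dict.mk p.2)) hp)
      (by
        have hk : (PySem.Dict.mk (dict.map (fun p => (p.1, PySem.Dict.mk p.2)))).keys
            = dict.map (fun x => x.1) := by
          simp only [PySem.Dict.keys_mk, List.map_map]; rfl
        rw [hk]; exact h1) _
  unfold inverse_dicts afold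
  simp only [PySem.Dict.keys_mk, List.map_map, List.foldl_map, Function.comp]
  congr 1
  apply congrArg
  apply PySem.List.foldl_congr_mem
  intro inv p hp
  rw [hbig p hp, PySem.Dict.keys_mk, List.foldl_map]
  apply PySem.List.foldl_congr_mem
  intro inv' q hq
  have hv : (PySem.Dict.mk p.2).getD q.1 0 = q.2 :=
    PySem.Dict.getD_of_mem_items _ (by simpa using hq)
      (by simpa [PySem.Dict.keys_mk] using h2 p hp) _
  rw [hv]
  rfl

-- how one gstep changes a lookup
theorem getD_gstep (inv : PySem.Dict String (PySem.Dict String Int)) (k : String) (q : String × Int)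
    (x : String) :
    (gstep k inv q).getD x PySem.Dict.empty =
      if x = q.1 then (inv.getD q.1 PySem.Dict.empty).insert k q.2
      else inv.getD x PySem.Dict.empty := by
  by_cases hc : inv.contains q.1
  · simp [gstep, hc, PySem.Dict.getD_modify]
  · have hc' : inv.contains q.1 = false := by simpa using hc
    have h0 := PySem.Dict.getD_of_not_contains inv (k := q.1) PySem.Dict.empty hc'
    simp only [gstep, hc', Bool.false_eq_true, ite_false, PySem.Dict.getD_modify,
      PySem.Dict.getD_insert]
    by_cases hx : x = q.1 <;> simp [hx, h0]

-- how one inner loop (over one outer pair's entries) changes a lookup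
theorem getD_innerfold (v : List (String × Int)) (inv : PySem.Dict String (PySem.Dict String Int))
    (k ik : String) (hnd : (v.map (·.1)).Nodup) :
    (v.foldl (gstep k) inv).getD ik PySem.Dict.empty =
      ((PySem.Dict.mk v).get? ik).elim (inv.getD ik PySem.Dict.empty)
        (fun val => (inv.getD ik PySem.Dict.empty).insert k val) := by
  induction v generalizing inv with
  | nil => simp [PySem.Dict.get?, PySem.Dict.empty]
  | cons q rest ih =>
    simp only [List.map_cons, List.nodup_cons] at hnd
    rw [List.foldl_cons, ih _ hnd.2, PySem.Dict.get?_mk_cons]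
    by_cases hq : ik = q.1
    · subst hq
      have hnone : (PySem.Dict.mk rest).get? q.1 = none := by
        rw [PySem.Dict.get?_eq_none_iff_not_mem_keys]
        simpa [PySem.Dict.keys_mk] using hnd.1
      simp [hnone, getD_gstep]
    · have hne : (q.1 == ik) = false := beq_eq_false_iff_ne.mpr (fun h => hq h.symm)
      simp [hne, getD_gstep, hq]

-- A's row at ik is B's row, rebuilt by inserts
theorem getD_afold (dict : List (String × List (String × Int)))
    (h : ∀ p ∈ dict, (p.2.map (·.1)).Nodup) (ik : String) :
    (afold dict).getD ik PySem.Dict.empty =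
      (collect dict ik).foldl (fun d e => d.insert e.1 e.2) PySem.Dict.empty := by
  induction dict using List.reverseRecOn with
  | nil => simp [afold, collect, PySem.Dict.getD_empty]
  | append_singleton l p ih =>
    have hl : ∀ q ∈ l, (q.2.map (·.1)).Nodup := fun q hq => h q (by simp [hq])
    have hp : (p.2.map (·.1)).Nodup := h p (by simp)
    rw [afold, List.foldl_append, List.foldl_cons, List.foldl_nil]
    rw [getD_innerfold _ _ _ _ hp]
    rw [collect, List.filterMap_append, List.foldl_append]
    rw [show (l.foldl (fun inv p => p.2.foldl (gstep p.1) inv) PySem.Dict.empty) = afold l from rfl,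
      show l.filterMap (fun p => ((PySem.Dict.mk p.2).get? ik).map (fun v => (p.1, v))) = collect l ik from rfl,
      ih hl]
    cases hg : (PySem.Dict.mk p.2).get? ik <;> simp [hg]

theorem keys_gstep (inv : PySem.Dict String (PySem.Dict String Int)) (k : String) (q : String × Int) :
    (gstep k inv q).keys = PySem.Set.add inv.keys q.1 := by
  rw [PySem.Set.add_eq_ite]
  by_cases hc : inv.contains q.1
  · have hm : q.1 ∈ inv.keys := (PySem.Dict.contains_iff_mem_keys inv q.1).mp hc
    simp [gstep, hc, PySem.Dict.keys_modify, PySem.Dict.keys_insert_of_contains _ _ hc, hm]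
  · have hc' : inv.contains q.1 = false := by simpa using hc
    have hm : q.1 ∉ inv.keys := by
      simp [← PySem.Dict.contains_iff_mem_keys, hc']
    simp only [gstep, hc', Bool.false_eq_true, ite_false, PySem.Dict.keys_modify]
    rw [PySem.Dict.keys_insert_of_contains _ _ (PySem.Dict.contains_insert_self inv q.1 _),
      PySem.Dict.keys_insert_of_not_contains _ _ hc']
    simp [hm]

theorem keys_innerfold (v : List (String × Int)) (inv : PySem.Dict String (PySem.Dict String Int))
    (k : String) :
    (v.foldl (gstep k) inv).keys = v.foldl (fun s q => PySem.Set.add s q.1) inv.keys := by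
  induction v generalizing inv with
  | nil => simp
  | cons q rest ih => rw [List.foldl_cons, List.foldl_cons, ih, keys_gstep]

theorem keys_afold_gen (l : List (String × List (String × Int)))
    (inv : PySem.Dict String (PySem.Dict String Int)) :
    (l.foldl (fun inv p => p.2.foldl (gstep p.1) inv) inv).keys =
      l.foldl (fun s p => p.2.foldl (fun s q => PySem.Set.add s q.1) s) inv.keys := by
  induction l generalizing inv with
  | nil => simp
  | cons p rest ih => rw [List.foldl_cons, List.foldl_cons, ih, keys_innerfold]

-- A's output keys, in order, are exactly B's inner_keys
theorem keys_afold (dict : List (String × List (String × Int))) :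
    (afold dict).keys = ikeys dict := by
  rw [afold, ikeys, keys_afold_gen]
  rfl

theorem nodup_ikeys_gen (l : List (String × List (String × Int))) (s : PySem.Set String)
    (hs : s.Nodup) :
    (l.foldl (fun s p => p.2.foldl (fun s q => PySem.Set.add s q.1) s) s).Nodup := by
  induction l generalizing s with
  | nil => exact hs
  | cons p rest ih =>
    rw [List.foldl_cons, ← PySem.Set.update_map_eq_foldl_add]
    exact ih _ (PySem.Set.nodup_update _ _ hs)

theorem nodup_ikeys (dict : List (String × List (String × Int))) : (ikeys dict).Nodup :=
  nodup_ikeys_gen dict PySem.Set.empty List.nodup_nil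

theorem nodup_collect_keys (dict : List (String × List (String × Int)))
    (h : (dict.map (·.1)).Nodup) (ik : String) : ((collect dict ik).map (·.1)).Nodup := by
  have hsub : ((collect dict ik).map (·.1)).Sublist (dict.map (·.1)) := by
    induction dict with
    | nil => simp [collect]
    | cons p rest ih =>
      rw [collect, List.filterMap_cons]
      cases hgp : ((PySem.Dict.mk p.2).get? ik).map (fun v => (p.1, v)) with
      | none =>
        simp only [List.map_cons]
        exact (ih (by simpa using (List.nodup_cons.mp (by simpa using h)).2)).cons _
      | some e =>
        have he : e.1 = p.1 := by
          cases hg : (PySem.Dict.mk p.2).get? ik <;> simp [hg] at hgp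
          · simp [← hgp]
        simp only [List.map_cons, he]
        exact (ih (by simpa using (List.nodup_cons.mp (by simpa using h)).2)).cons₂ _
  exact h.sublist hsub

theorem items_collect_fold (dict : List (String × List (String × Int)))
    (h : (dict.map (·.1)).Nodup) (ik : String) :
    ((collect dict ik).foldl (fun d e => d.insert e.1 e.2) PySem.Dict.empty).items
      = collect dict ik := by
  have := PySem.Dict.items_foldl_insert_fresh (collect dict ik) (fun e => e.1) (fun e => e.2)
    PySem.Dict.empty (fun a _ => by simp [PySem.Dict.contains_empty])
    (nodup_collect_keys dict h ik)
  simpa using this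

-- ===== VERDICT (by name: the statement is the Claim_ definition above) =====
theorem inverse_dicts_spec : Claim_equal_inverse_dicts := by
  intro dict _ hpre
  unfold Spec_inverse_dicts
  rw [stage1 dict hpre]
  rw [PySem.Dict.items_eq_map_keys (afold dict)
    (by rw [keys_afold]; exact nodup_ikeys dict) PySem.Dict.empty]
  rw [List.map_map, keys_afold]
  unfold inverse_dicts_alt
  apply List.map_congr_left
  intro ik _
  simp only [Function.comp_apply]
  rw [getD_afold dict hpre.2 ik, items_collect_fold dict hpre.1 ik]
  rfl
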